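-- pv_equiv track=rewrite | github.com/CrescentLuo/sequtils | scripts/utils.py | ambiguity_nt
-- ===== SOURCE A (Python) =====
-- import itertools
--
-- def ambiguity_nt(seq):
--     '''
--     N = A or C or G or T (any)
--     B = C or G or T (not A)
--     D = A or G or T (not C)
--     H = A or C or T (not G)
--     V = A or C or G (not T)
--     W = A or T (weak)
--     S = C or G (strong)
--     R = A or G (purine)
--     Y = C or T (pyrimidine)
--     M = A or C (amino)
--     K = G or T (keto)
--     '''
--     ambg_dict = {
--         'N':['A', 'C', 'G', 'T'],
--         'B':['C', 'G', 'T'],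
--         'D':['A', 'G', 'T'],
--         'H':['A', 'C', 'T'],
--         'V':['A', 'C', 'G'],
--         'W':['A', 'T'],
--         'S':['C', 'G'],
--         'R':['A', 'G'],
--         'Y':['C', 'T'],
--         'M':['A', 'C'],
--         'K':['G', 'T'],
--         'A':['A'],
--         'T':['T'],
--         'C':['C'],
--         'G':['G']
--     }
--     combinations = list()
--     for nt in seq:
--         combinations.append(ambg_dict[nt])
--     seq_permutations = list()
--     for id, comb_seq in enumerate(itertools.product(*combinations)):
--         comb_seq = ''.join(comb_seq)
--         seq_permutations.append(comb_seq)
--     return seq_permutations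
-- ===== SOURCE B (Python) =====
-- def ambiguity_nt(seq):
--     codes = {'N': 'ACGT', 'B': 'CGT', 'D': 'AGT', 'H': 'ACT', 'V': 'ACG',
--              'W': 'AT', 'S': 'CG', 'R': 'AG', 'Y': 'CT', 'M': 'AC',
--              'K': 'GT', 'A': 'A', 'T': 'T', 'C': 'C', 'G': 'G'}
--
--     def expand(s):
--         if not s:
--             return ['']
--         return [c + tail for c in codes[s[0]] for tail in expand(s[1:])]
--
--     return expand(seq)
-- ===== Notes on version B (the rewrite author's own statement) =====
-- stated objective: simpler
-- what changed: B drops itertools.product and the intermediate combinations list, using a recursive suffix expansion: look up each position's choice string in a char-to-string table, expand the rest of the sequence recursively, and prepend each allowed nucleotide to every expansion of the tail.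
import Mathlib
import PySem

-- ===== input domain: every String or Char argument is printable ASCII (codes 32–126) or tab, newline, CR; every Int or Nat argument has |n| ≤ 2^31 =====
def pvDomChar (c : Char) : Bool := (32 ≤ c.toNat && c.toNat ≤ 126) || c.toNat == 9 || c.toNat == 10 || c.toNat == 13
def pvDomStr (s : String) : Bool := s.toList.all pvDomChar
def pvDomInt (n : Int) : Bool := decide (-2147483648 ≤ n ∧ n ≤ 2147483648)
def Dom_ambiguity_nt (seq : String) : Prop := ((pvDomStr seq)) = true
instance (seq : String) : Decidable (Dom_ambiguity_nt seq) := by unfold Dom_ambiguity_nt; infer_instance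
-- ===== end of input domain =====

-- B replaces the combinations list + itertools.product with a recursive suffix expansion
-- (a table of choice strings; expand the tail, then prepend each allowed nucleotide) — simpler decomposition, same cost.

-- ===== PORT A =====
-- ambg_dict lookup; Python raises KeyError on other characters (excluded by Pre_),
-- there the helper returns [] (nothing is claimed outside Pre_).
def ambgDictA (c : Char) : List String :=
  if c = 'N' then ["A", "C", "G", "T"]
  else if c = 'B' then ["C", "G", "T"]
  else if c = 'D' then ["A", "G", "T"]
  else if c = 'H' then ["A", "C", "T"]
  else if c = 'V' then ["A", "C", "G"]
  else if c = 'W' then ["A", "T"]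
  else if c = 'S' then ["C", "G"]
  else if c = 'R' then ["A", "G"]
  else if c = 'Y' then ["C", "T"]
  else if c = 'M' then ["A", "C"]
  else if c = 'K' then ["G", "T"]
  else if c = 'A' then ["A"]
  else if c = 'T' then ["T"]
  else if c = 'C' then ["C"]
  else if c = 'G' then ["G"]
  else []

-- itertools.product(*combinations): leftmost position varies slowest.
def prodA : List (List String) → List (List String)
  | [] => [[]]
  | l :: ls => l.flatMap (fun c => (prodA ls).map (fun t => c :: t))

def ambiguity_nt (seq : String) : List String :=
  let combinations := seq.toList.foldl (fun acc nt => acc ++ [ambgDictA nt]) []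
  (prodA combinations).foldl (fun acc t => acc ++ [String.join t]) []

-- ===== PORT B =====
-- the dict of choice strings from Source B (on KeyError characters, excluded by Pre_, the lookup yields "")
def codesB : List (Char × String) :=
  [('N', "ACGT"), ('B', "CGT"), ('D', "AGT"), ('H', "ACT"), ('V', "ACG"),
   ('W', "AT"), ('S', "CG"), ('R', "AG"), ('Y', "CT"), ('M', "AC"),
   ('K', "GT"), ('A', "A"), ('T', "T"), ('C', "C"), ('G', "G")]

-- expand(s): recursive suffix expansion, c + tail = prepend one character
def expandB : List Char → List String
  | [] => [""]
  | c :: rest =>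
      (((codesB.lookup c).getD "").toList).flatMap
        (fun x => (expandB rest).map (fun tail => String.ofList (x :: tail.toList)))

def ambiguity_nt_alt (seq : String) : List String := expandB seq.toList

-- ===== PRECONDITION & SPEC =====
-- Pre_ excludes exactly the strings containing a character outside the ambiguity dict,
-- on which Python A raises KeyError (B raises there too).
def isNT (c : Char) : Bool :=
  c == 'N' || c == 'B' || c == 'D' || c == 'H' || c == 'V' || c == 'W' || c == 'S' ||
  c == 'R' || c == 'Y' || c == 'M' || c == 'K' || c == 'A' || c == 'T' || c == 'C' || c == 'G'
def Pre_ambiguity_nt (seq : String) : Prop := seq.toList.all isNT = true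
instance (seq : String) : Decidable (Pre_ambiguity_nt seq) := by unfold Pre_ambiguity_nt; infer_instance
def pvWitness_ambiguity_nt : String := "ANR"

def Spec_ambiguity_nt (seq : String) (out : List String) : Prop := out = ambiguity_nt_alt seq
instance (seq : String) (out : List String) : Decidable (Spec_ambiguity_nt seq out) := by unfold Spec_ambiguity_nt; infer_instance

-- ===== CLAIM (what is proved, stated in full; the proofs are below) =====
def Claim_equal_ambiguity_nt : Prop := ∀ (seq : String), Dom_ambiguity_nt seq → Pre_ambiguity_nt seq → Spec_ambiguity_nt seq (ambiguity_nt seq)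

-- ===== LEMMAS AND PROOFS =====

-- A's one-character-string table is B's choice string, character by character
theorem dict_eq (c : Char) :
    ambgDictA c = (((codesB.lookup c).getD "").toList).map (fun x => String.ofList [x]) := by
  by_cases h1 : c = 'N'
  · subst h1; rfl
  by_cases h2 : c = 'B'
  · subst h2; rfl
  by_cases h3 : c = 'D'
  · subst h3; rfl
  by_cases h4 : c = 'H'
  · subst h4; rfl
  by_cases h5 : c = 'V'
  · subst h5; rfl
  by_cases h6 : c = 'W'
  · subst h6; rfl
  by_cases h7 : c = 'S'
  · subst h7; rfl
  by_cases h8 : c = 'R'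
  · subst h8; rfl
  by_cases h9 : c = 'Y'
  · subst h9; rfl
  by_cases h10 : c = 'M'
  · subst h10; rfl
  by_cases h11 : c = 'K'
  · subst h11; rfl
  by_cases h12 : c = 'A'
  · subst h12; rfl
  by_cases h13 : c = 'T'
  · subst h13; rfl
  by_cases h14 : c = 'C'
  · subst h14; rfl
  by_cases h15 : c = 'G'
  · subst h15; rfl
  simp only [ambgDictA, h1, h2, h3, h4, h5, h6, h7, h8, h9, h10, h11, h12, h13, h14, h15,
    if_false, codesB, List.lookup]
  repeat' split
  all_goals simp_all

theorem foldl_append_map {α β : Type} (f : α → β) (xs : List α) (acc : List β) :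
    xs.foldl (fun acc t => acc ++ [f t]) acc = acc ++ xs.map f := by
  induction xs generalizing acc with
  | nil => simp
  | cons x xs ih => simp [List.foldl, ih]

theorem str_foldl_append (t : List String) (x : String) :
    t.foldl (fun r s => r ++ s) x = x ++ t.foldl (fun r s => r ++ s) "" := by
  induction t generalizing x with
  | nil => simp
  | cons s t ih =>
    simp only [List.foldl]
    rw [ih (x ++ s), ih ("" ++ s)]
    simp [String.append_assoc]

theorem join_cons (s : String) (t : List String) :
    String.join (s :: t) = s ++ String.join t := by
  simp only [String.join, List.foldl]
  rw [str_foldl_append t ("" ++ s)]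
  simp

theorem flatMap_congr_mem {α β : Type} {l : List α} {f g : α → List β}
    (h : ∀ x ∈ l, f x = g x) : l.flatMap f = l.flatMap g := by
  simp only [List.flatMap_def]
  rw [List.map_congr_left h]

-- B's suffix recursion computes exactly A's product-then-join
theorem expandB_eq_prod (cs : List Char) :
    expandB cs = (prodA (cs.map ambgDictA)).map String.join := by
  induction cs with
  | nil => rfl
  | cons c cs ih =>
    simp only [expandB, List.map_cons, prodA]
    rw [dict_eq, List.flatMap_map, List.map_flatMap]
    apply flatMap_congr_mem
    intro x _
    rw [ih, List.map_map, List.map_map]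
    apply List.map_congr_left
    intro t _
    simp only [Function.comp]
    rw [join_cons]
    apply String.toList_injective
    simp

-- ===== VERDICT (by name: the statement is the Claim_ definition above) =====
theorem ambiguity_nt_spec : Claim_equal_ambiguity_nt := by
  intro seq _ _
  unfold Spec_ambiguity_nt ambiguity_nt ambiguity_nt_alt
  rw [foldl_append_map, foldl_append_map, expandB_eq_prod]
  simp
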